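-- pv_equiv track=rewrite | github.com/ht21992/Cryptogram-Game | game.py | get_clicked_letter
-- ===== SOURCE A (Python) =====
-- keyboard_layout = ["QWERTYUIOP", "ASDFGHJKL", "ZXCVBNM"]
--
-- def get_clicked_letter(mouse_pos):
--     """Returns the letter clicked on the keyboard, or None if none clicked."""
--     x_start, y_start = 50, 400
--     key_width, key_height = 50, 50
--     gap = 10
--
--     for row in keyboard_layout:
--         x = x_start
--         for letter in row:
--             if (
--                 x < mouse_pos[0] < x + key_width
--                 and y_start < mouse_pos[1] < y_start + key_height
--             ):
--                 return letter
--             x += key_width + gap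
--         y_start += key_height + gap
--     return None
-- ===== SOURCE B (Python) =====
-- keyboard_layout = ["QWERTYUIOP", "ASDFGHJKL", "ZXCVBNM"]
--
-- def get_clicked_letter(mouse_pos):
--     """Returns the letter clicked on the keyboard, or None if none clicked."""
--     col, xr = divmod(mouse_pos[0] - 50, 60)
--     row, yr = divmod(mouse_pos[1] - 400, 60)
--     if 0 < xr < 50 and 0 < yr < 50 and 0 <= row < 3 and 0 <= col < len(keyboard_layout[row]):
--         return keyboard_layout[row][col]
--     return None
-- ===== Notes on version B (the rewrite author's own statement) =====
-- stated objective: simpler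
-- what changed: Replaces the nested scan over all 26 key rectangles by direct grid arithmetic: divmod of the offset coordinates by the 60px key pitch yields row/column, with the remainder tested against the 50px key width to reproduce the gaps and open boundaries.
import Mathlib
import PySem

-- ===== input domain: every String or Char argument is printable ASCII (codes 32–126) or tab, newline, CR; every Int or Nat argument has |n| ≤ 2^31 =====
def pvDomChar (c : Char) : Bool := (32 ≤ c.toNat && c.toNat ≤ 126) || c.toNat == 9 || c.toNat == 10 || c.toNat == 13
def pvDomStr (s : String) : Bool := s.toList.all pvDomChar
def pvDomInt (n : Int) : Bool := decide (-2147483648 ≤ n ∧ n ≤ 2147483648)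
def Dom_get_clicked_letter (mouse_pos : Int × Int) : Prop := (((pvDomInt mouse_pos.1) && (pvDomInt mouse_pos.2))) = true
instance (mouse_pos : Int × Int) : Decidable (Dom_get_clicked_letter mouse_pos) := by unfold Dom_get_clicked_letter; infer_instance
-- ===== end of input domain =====

-- B replaces A's scan over all 26 key rectangles by direct grid arithmetic (divmod by the 60px pitch); objective: simpler.

def pvKeyboardLayout : List String := ["QWERTYUIOP", "ASDFGHJKL", "ZXCVBNM"]

-- ===== PORT A =====
-- inner 'for letter in row' loop: x is the running key x-position
def pvRowLoop (mouse_pos : Int × Int) (ystart : Int) : List Char → Int → Option String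
  | [], _ => none
  | letter :: rest, x =>
    if x < mouse_pos.1 ∧ mouse_pos.1 < x + 50 ∧ ystart < mouse_pos.2 ∧ mouse_pos.2 < ystart + 50 then
      some (String.ofList [letter])
    else pvRowLoop mouse_pos ystart rest (x + (50 + 10))

-- outer 'for row in keyboard_layout' loop: ystart is the running y_start
def pvRowsLoop (mouse_pos : Int × Int) : List String → Int → Option String
  | [], _ => none
  | row :: rest, ystart =>
    match pvRowLoop mouse_pos ystart row.toList 50 with
    | some l => some l
    | none => pvRowsLoop mouse_pos rest (ystart + (50 + 10))

def get_clicked_letter (mouse_pos : Int × Int) : Option String :=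
  pvRowsLoop mouse_pos pvKeyboardLayout 400

-- ===== PORT B =====
def get_clicked_letter_alt (mouse_pos : Int × Int) : Option String :=
  let col := PySem.Int.floordiv (mouse_pos.1 - 50) 60
  let xr  := PySem.Int.mod (mouse_pos.1 - 50) 60
  let row := PySem.Int.floordiv (mouse_pos.2 - 400) 60
  let yr  := PySem.Int.mod (mouse_pos.2 - 400) 60
  if 0 < xr ∧ xr < 50 ∧ 0 < yr ∧ yr < 50 ∧ 0 ≤ row ∧ row < 3 ∧ 0 ≤ col ∧
      col < PySem.Str.len (((PySem.List.pyGet? pvKeyboardLayout row).getD "")) then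
    ((PySem.List.pyGet? pvKeyboardLayout row).bind
      (fun s => (PySem.Str.pyGet? s col).map (fun c => String.ofList [c])))
  else none

-- ===== PRECONDITION & SPEC =====
def Spec_get_clicked_letter (mouse_pos : Int × Int) (out : Option String) : Prop := out = get_clicked_letter_alt mouse_pos
instance (mouse_pos : Int × Int) (out : Option String) : Decidable (Spec_get_clicked_letter mouse_pos out) := by unfold Spec_get_clicked_letter; infer_instance

-- ===== CLAIM (what is proved, stated in full; the proofs are below) =====
def Claim_equal_get_clicked_letter : Prop := ∀ (mouse_pos : Int × Int), Dom_get_clicked_letter mouse_pos → Spec_get_clicked_letter mouse_pos (get_clicked_letter mouse_pos)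

-- ===== LEMMAS AND PROOFS =====
-- row lengths of the literal layout, as numerals (closed terms, by rfl)
theorem pv_len0 : PySem.Str.len ((PySem.List.pyGet? pvKeyboardLayout 0).getD "") = 10 := rfl
theorem pv_len1 : PySem.Str.len ((PySem.List.pyGet? pvKeyboardLayout 1).getD "") = 9 := rfl
theorem pv_len2 : PySem.Str.len ((PySem.List.pyGet? pvKeyboardLayout 2).getD "") = 7 := rfl

-- the inner loop misses every key of the row
theorem pv_rowLoop_none (p : Int × Int) (ys : Int) (cs : List Char) (x0 : Int)
    (h : ∀ j : Nat, j < cs.length →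
      ¬(x0 + 60*(j:Int) < p.1 ∧ p.1 < x0 + 60*(j:Int) + 50 ∧ ys < p.2 ∧ p.2 < ys + 50)) :
    pvRowLoop p ys cs x0 = none := by
  induction cs generalizing x0 with
  | nil => rfl
  | cons a t ih =>
    rw [pvRowLoop, if_neg]
    · exact ih (x0 + (50 + 10)) (fun j hj hC => by
        refine h (j+1) (by simp only [List.length_cons]; omega) ?_
        obtain ⟨a1, a2, a3, a4⟩ := hC
        refine ⟨by push_cast; omega, by push_cast; omega, a3, a4⟩)
    · intro hC
      obtain ⟨a1, a2, a3, a4⟩ := hC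
      exact h 0 (by simp only [List.length_cons]; omega) ⟨by omega, by omega, a3, a4⟩

-- the inner loop hits key j of the row (the key rectangles are 60 apart, so the hit is unique)
theorem pv_rowLoop_some (p : Int × Int) (ys : Int) (cs : List Char) (x0 : Int) (j : Nat)
    (hj : j < cs.length)
    (hx1 : x0 + 60*(j:Int) < p.1) (hx2 : p.1 < x0 + 60*(j:Int) + 50)
    (hy1 : ys < p.2) (hy2 : p.2 < ys + 50) :
    pvRowLoop p ys cs x0 = some (String.ofList [cs[j]]) := by
  induction cs generalizing x0 j with
  | nil => exact absurd hj (by simp)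
  | cons a t ih =>
    match j with
    | 0 =>
      rw [pvRowLoop, if_pos ⟨by push_cast at hx1; omega, by push_cast at hx2; omega, hy1, hy2⟩]
      rfl
    | Nat.succ k =>
      rw [pvRowLoop, if_neg (by intro hC; obtain ⟨a1, a2, _, _⟩ := hC; push_cast at hx1; omega)]
      rw [ih (x0 + (50 + 10)) k (by simp only [List.length_cons] at hj; omega)
        (by push_cast at hx1 ⊢; omega) (by push_cast at hx2 ⊢; omega)]
      rfl

-- the outer loop misses every key
theorem pv_rowsLoop_none (p : Int × Int) (rows : List String) (ys : Int)
    (h : ∀ (i : Nat) (hi : i < rows.length), ∀ j : Nat, j < (rows[i]'hi).toList.length →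
      ¬(50 + 60*(j:Int) < p.1 ∧ p.1 < 50 + 60*(j:Int) + 50 ∧
        ys + 60*(i:Int) < p.2 ∧ p.2 < ys + 60*(i:Int) + 50)) :
    pvRowsLoop p rows ys = none := by
  induction rows generalizing ys with
  | nil => rfl
  | cons r t ih =>
    rw [pvRowsLoop, pv_rowLoop_none p ys r.toList 50 (fun j hj hC => by
      obtain ⟨a1, a2, a3, a4⟩ := hC
      exact h 0 (by simp only [List.length_cons]; omega) j (by simpa using hj)
        ⟨by omega, by omega, by omega, by omega⟩)]
    exact ih (ys + (50 + 10)) (fun i hi j hj hC => by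
      obtain ⟨a1, a2, a3, a4⟩ := hC
      refine h (i+1) (by simp only [List.length_cons]; omega) j (by simpa using hj)
        ⟨a1, a2, by push_cast; omega, by push_cast; omega⟩)

-- the outer loop hits key j of row i (row bands are 60 apart, so the row is unique)
theorem pv_rowsLoop_some (p : Int × Int) (rows : List String) (ys : Int) (i j : Nat)
    (hi : i < rows.length) (hj : j < (rows[i]'hi).toList.length)
    (hx1 : 50 + 60*(j:Int) < p.1) (hx2 : p.1 < 50 + 60*(j:Int) + 50)
    (hy1 : ys + 60*(i:Int) < p.2) (hy2 : p.2 < ys + 60*(i:Int) + 50) :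
    pvRowsLoop p rows ys = some (String.ofList [(rows[i]'hi).toList[j]'hj]) := by
  induction rows generalizing ys i with
  | nil => exact absurd hi (by simp)
  | cons r t ih =>
    match i with
    | 0 =>
      rw [pvRowsLoop, pv_rowLoop_some p ys r.toList 50 j (by simpa using hj)
        hx1 hx2 (by push_cast at hy1; omega) (by push_cast at hy2; omega)]
      rfl
    | Nat.succ k =>
      rw [pvRowsLoop, pv_rowLoop_none p ys r.toList 50
        (fun j' hj' hC => by obtain ⟨_, _, a3, a4⟩ := hC; push_cast at hy1; omega)]
      rw [ih (ys + (50 + 10)) k (by simp only [List.length_cons] at hi; omega) (by simpa using hj)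
        (by push_cast at hy1 ⊢; omega) (by push_cast at hy2 ⊢; omega)]
      simp

theorem pv_key (x y : Int) : get_clicked_letter (x, y) = get_clicked_letter_alt (x, y) := by
  have hx := PySem.Int.floordiv_mul_add_mod (x - 50) 60
  have hx0 := PySem.Int.mod_nonneg (x - 50) (by norm_num : (0:Int) < 60)
  have hx1 := PySem.Int.mod_lt (x - 50) (by norm_num : (0:Int) < 60)
  have hy := PySem.Int.floordiv_mul_add_mod (y - 400) 60
  have hy0 := PySem.Int.mod_nonneg (y - 400) (by norm_num : (0:Int) < 60)
  have hy1 := PySem.Int.mod_lt (y - 400) (by norm_num : (0:Int) < 60)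
  simp only [get_clicked_letter, get_clicked_letter_alt]
  generalize hc : PySem.Int.floordiv (x - 50) 60 = c at *
  generalize hxr : PySem.Int.mod (x - 50) 60 = xr at *
  generalize hr : PySem.Int.floordiv (y - 400) 60 = r at *
  generalize hyr : PySem.Int.mod (y - 400) 60 = yr at *
  by_cases hcond : 0 < xr ∧ xr < 50 ∧ 0 < yr ∧ yr < 50 ∧ 0 ≤ r ∧ r < 3 ∧ 0 ≤ c ∧
      c < PySem.Str.len ((PySem.List.pyGet? pvKeyboardLayout r).getD "")
  · obtain ⟨h1, h2, h3, h4, h5, h6, h7, h8⟩ := hcond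
    rw [if_pos ⟨h1, h2, h3, h4, h5, h6, h7, h8⟩]
    have hcn : ((c.toNat : Int)) = c := Int.toNat_of_nonneg h7
    have hr3 : r = 0 ∨ r = 1 ∨ r = 2 := by omega
    rcases hr3 with h | h | h <;> subst h
    · have h8' : c < (10:Int) := h8
      rw [pv_rowsLoop_some (x, y) pvKeyboardLayout 400 0 c.toNat (by decide)
        (by show c.toNat < 10; omega) (by omega) (by omega) (by omega) (by omega)]
      interval_cases c <;> rfl
    · have h8' : c < (9:Int) := h8
      rw [pv_rowsLoop_some (x, y) pvKeyboardLayout 400 1 c.toNat (by decide)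
        (by show c.toNat < 9; omega) (by omega) (by omega) (by omega) (by omega)]
      interval_cases c <;> rfl
    · have h8' : c < (7:Int) := h8
      rw [pv_rowsLoop_some (x, y) pvKeyboardLayout 400 2 c.toNat (by decide)
        (by show c.toNat < 7; omega) (by omega) (by omega) (by omega) (by omega)]
      interval_cases c <;> rfl
  · rw [if_neg hcond]
    refine pv_rowsLoop_none (x, y) pvKeyboardLayout 400 (fun i hi j hj hhit => ?_)
    obtain ⟨a1, a2, a3, a4⟩ := hhit
    apply hcond
    have hi3 : i = 0 ∨ i = 1 ∨ i = 2 := by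
      have : i < 3 := hi
      omega
    have hrc : r = (i:Int) ∧ c = (j:Int) := by constructor <;> omega
    obtain ⟨hre, hce⟩ := hrc
    subst hre hce
    rcases hi3 with h | h | h <;> subst h <;>
      refine ⟨by omega, by omega, by omega, by omega, by omega, by omega, by omega, ?_⟩
    · rw [show (((0:Nat):Int)) = (0:Int) from rfl, pv_len0]
      have : j < 10 := by simpa [pvKeyboardLayout] using hj
      omega
    · rw [show (((1:Nat):Int)) = (1:Int) from rfl, pv_len1]
      have : j < 9 := by simpa [pvKeyboardLayout] using hj
      omega
    · rw [show (((2:Nat):Int)) = (2:Int) from rfl, pv_len2]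
      have : j < 7 := by simpa [pvKeyboardLayout] using hj
      omega

-- ===== VERDICT (by name: the statement is the Claim_ definition above) =====
theorem get_clicked_letter_spec : Claim_equal_get_clicked_letter := by
  intro ⟨x, y⟩ _
  exact pv_key x y
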